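-- pv_equiv track=rewrite | github.com/marsylp/Nexus-Agent | agent_core/approval.py | get_tool_categories
-- ===== SOURCE A (Python) =====
-- TOOL_CATEGORIES = {
--     "read": ["calculator", "current_time", "system_info", "get_env",
--              "text_stats", "json_parse", "regex_match", "encode_decode",
--              "sort_data", "deduplicate", "csv_parse", "web_search",
--              "read_file", "list_dir", "http_get"],
--     "write": ["write_file", "shell", "run_python", "http_post"],
--     "shell": ["shell"],
--     "web": ["web_search", "http_get", "http_post"],
-- }
--
-- def get_tool_categories(tool_name):
--     """获取工具所属分类"""
--     cats = set()
--     for cat, tools in TOOL_CATEGORIES.items():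
--         if tool_name in tools:
--             cats.add(cat)
--     if tool_name.startswith("mcp_"):
--         cats.add("read")
--     return cats or {"read"}
-- ===== SOURCE B (Python) =====
-- TOOL_CATEGORIES = {
--     "read": ["calculator", "current_time", "system_info", "get_env",
--              "text_stats", "json_parse", "regex_match", "encode_decode",
--              "sort_data", "deduplicate", "csv_parse", "web_search",
--              "read_file", "list_dir", "http_get"],
--     "write": ["write_file", "shell", "run_python", "http_post"],
--     "shell": ["shell"],
--     "web": ["web_search", "http_get", "http_post"],
-- }
--
-- # Inverse index: tool name -> set of categories, built once at import time.
-- INV = {}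
-- for _cat, _tools in TOOL_CATEGORIES.items():
--     for _t in _tools:
--         INV.setdefault(_t, set()).add(_cat)
--
-- def get_tool_categories(tool_name):
--     """获取工具所属分类"""
--     cats = set(INV.get(tool_name, set()))
--     if tool_name.startswith("mcp_"):
--         cats.add("read")
--     return cats or {"read"}
-- ===== Notes on version B (the rewrite author's own statement) =====
-- stated objective: idiomatic
-- what changed: A scans every category's tool list on each call; B precomputes an inverse index (tool name -> set of its categories) once at module load and answers each call with a single dict lookup plus the mcp_/empty-default rules.
import Mathlib
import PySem

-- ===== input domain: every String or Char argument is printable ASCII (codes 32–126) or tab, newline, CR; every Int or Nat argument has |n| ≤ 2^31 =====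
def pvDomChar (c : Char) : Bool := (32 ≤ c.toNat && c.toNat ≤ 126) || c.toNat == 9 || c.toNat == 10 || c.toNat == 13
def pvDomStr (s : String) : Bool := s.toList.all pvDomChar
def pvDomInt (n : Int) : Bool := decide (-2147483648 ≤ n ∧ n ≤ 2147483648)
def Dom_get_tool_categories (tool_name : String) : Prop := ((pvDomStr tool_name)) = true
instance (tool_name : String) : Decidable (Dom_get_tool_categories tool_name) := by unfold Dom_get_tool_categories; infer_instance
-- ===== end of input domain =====

-- B replaces A's per-category membership scans by a precomputed inverse index (tool → categories)
-- built once from TOOL_CATEGORIES; objective: idiomatic. Return value only (a fresh set either way).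

-- ===== PORT A =====
def TOOL_CATEGORIES : PySem.Dict String (List String) := PySem.Dict.ofList
  [ ("read", ["calculator", "current_time", "system_info", "get_env",
              "text_stats", "json_parse", "regex_match", "encode_decode",
              "sort_data", "deduplicate", "csv_parse", "web_search",
              "read_file", "list_dir", "http_get"]),
    ("write", ["write_file", "shell", "run_python", "http_post"]),
    ("shell", ["shell"]),
    ("web", ["web_search", "http_get", "http_post"]) ]

def get_tool_categories (tool_name : String) : List String :=
  let cats : PySem.Set String :=
    TOOL_CATEGORIES.items.foldl
      (fun cats p => if tool_name ∈ p.2 then PySem.Set.add cats p.1 else cats)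
      PySem.Set.empty
  let cats := if PySem.Str.startswith tool_name "mcp_" then PySem.Set.add cats "read" else cats
  if cats = [] then ["read"] else cats

-- ===== PORT B =====
-- inverse index, built once: for each (cat, tools), INV.setdefault(tool, set()).add(cat)
def pvINV : PySem.Dict String (PySem.Set String) :=
  TOOL_CATEGORIES.items.foldl
    (fun d p => p.2.foldl (fun d t => d.modify t PySem.Set.empty (fun s => PySem.Set.add s p.1)) d)
    PySem.Dict.empty

def get_tool_categories_alt (tool_name : String) : List String :=
  let cats : PySem.Set String := PySem.Set.ofList (pvINV.getD tool_name PySem.Set.empty)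
  let cats := if PySem.Str.startswith tool_name "mcp_" then PySem.Set.add cats "read" else cats
  if cats = [] then ["read"] else cats

-- ===== PRECONDITION & SPEC =====
def Spec_get_tool_categories (tool_name : String) (out : List String) : Prop := out = get_tool_categories_alt tool_name
instance (tool_name : String) (out : List String) : Decidable (Spec_get_tool_categories tool_name out) := by unfold Spec_get_tool_categories; infer_instance

-- ===== CLAIM (what is proved, stated in full; the proofs are below) =====
def Claim_equal_get_tool_categories : Prop := ∀ (tool_name : String), Dom_get_tool_categories tool_name → Spec_get_tool_categories tool_name (get_tool_categories tool_name)

-- ===== LEMMAS AND PROOFS =====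

-- every tool name occurring anywhere in TOOL_CATEGORIES (with repetitions, one block per category)
def pvAllTools : List String :=
  ["calculator", "current_time", "system_info", "get_env",
   "text_stats", "json_parse", "regex_match", "encode_decode",
   "sort_data", "deduplicate", "csv_parse", "web_search",
   "read_file", "list_dir", "http_get"] ++
  ["write_file", "shell", "run_python", "http_post"] ++
  ["shell"] ++
  ["web_search", "http_get", "http_post"]

-- the literal items of TOOL_CATEGORIES and the literal inverse index, for rewriting
theorem pv_items :
    TOOL_CATEGORIES.items =
    [ ("read", ["calculator", "current_time", "system_info", "get_env",
                "text_stats", "json_parse", "regex_match", "encode_decode",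
                "sort_data", "deduplicate", "csv_parse", "web_search",
                "read_file", "list_dir", "http_get"]),
      ("write", ["write_file", "shell", "run_python", "http_post"]),
      ("shell", ["shell"]),
      ("web", ["web_search", "http_get", "http_post"]) ] := by rfl

theorem pv_inv :
    pvINV = PySem.Dict.mk
    [ ("calculator", ["read"]), ("current_time", ["read"]), ("system_info", ["read"]),
      ("get_env", ["read"]), ("text_stats", ["read"]), ("json_parse", ["read"]),
      ("regex_match", ["read"]), ("encode_decode", ["read"]), ("sort_data", ["read"]),
      ("deduplicate", ["read"]), ("csv_parse", ["read"]), ("web_search", ["read", "web"]),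
      ("read_file", ["read"]), ("list_dir", ["read"]), ("http_get", ["read", "web"]),
      ("write_file", ["write"]), ("shell", ["write", "shell"]), ("run_python", ["write"]),
      ("http_post", ["write", "web"]) ] := by rfl

theorem pv_beq_false {a b : String} (h : ¬ b = a) : (a == b) = false := by
  simp only [beq_eq_false_iff_ne]; exact fun e => h e.symm

theorem pv_unknown (t : String) (h : t ∉ pvAllTools) :
    get_tool_categories t = ["read"] ∧ get_tool_categories_alt t = ["read"] := by
  simp only [pvAllTools, List.mem_append, not_or] at h
  obtain ⟨⟨⟨h1, h2⟩, h3⟩, h4⟩ := h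
  refine ⟨?_, ?_⟩
  · simp only [get_tool_categories, pv_items, List.foldl, if_neg h1, if_neg h2,
      if_neg h3, if_neg h4]
    simp [PySem.Set.add, PySem.Set.contains, PySem.Set.empty]
  · simp only [List.mem_cons, List.not_mem_nil, or_false, not_or] at h1 h2 h3 h4
    obtain ⟨a1, a2, a3, a4, a5, a6, a7, a8, a9, a10, a11, a12, a13, a14, a15⟩ := h1
    obtain ⟨b1, b2, b3, b4⟩ := h2
    simp [get_tool_categories_alt, pv_inv, PySem.Dict.getD, PySem.Dict.get?,
      PySem.Set.ofList, PySem.Set.add, PySem.Set.contains, PySem.Set.empty,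
      List.find?, pv_beq_false a1, pv_beq_false a2, pv_beq_false a3, pv_beq_false a4,
      pv_beq_false a5, pv_beq_false a6, pv_beq_false a7, pv_beq_false a8, pv_beq_false a9,
      pv_beq_false a10, pv_beq_false a11, pv_beq_false a12, pv_beq_false a13,
      pv_beq_false a14, pv_beq_false a15, pv_beq_false b1, pv_beq_false b2,
      pv_beq_false b3, pv_beq_false b4]

-- ===== VERDICT (by name: the statement is the Claim_ definition above) =====
theorem get_tool_categories_spec : Claim_equal_get_tool_categories := by
  intro t _
  unfold Spec_get_tool_categories
  by_cases h : t ∈ pvAllTools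
  · simp only [pvAllTools, List.mem_append, List.mem_cons, List.not_mem_nil, or_false,
      or_assoc] at h
    rcases h with rfl|rfl|rfl|rfl|rfl|rfl|rfl|rfl|rfl|rfl|rfl|rfl|rfl|rfl|rfl|rfl|rfl|rfl|rfl|rfl|rfl|rfl|rfl <;> decide
  · obtain ⟨ha, hb⟩ := pv_unknown t h
    rw [ha, hb]
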